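-- pv_equiv track=rewrite | github.com/sadgabriel/UGRP | src/reader.py | find_start_and_end_positions
-- ===== SOURCE A (Python) =====
-- def find_start_and_end_positions(map_data):
--     """
--     맵에서 'P'와 'B'의 위치를 찾습니다.
--
--     :param map_data: 맵 문자열
--     :return: (p_position, b_position) 각각 (row, col) 형태의 튜플 또는 None
--     """
--     p_position = None
--     b_position = None
--     lines = map_data.split("\n")
--
--     for r, line in enumerate(lines):
--         for c, char in enumerate(line):
--             if char == "P":
--                 p_position = (r, c)
--             elif char == "B":
--                 b_position = (r, c)
--
--     return p_position, b_position
-- ===== SOURCE B (Python) =====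
-- def find_start_and_end_positions(map_data):
--     lines = map_data.split("\n")
--     p_position = None
--     b_position = None
--     for r in range(len(lines) - 1, -1, -1):
--         line = lines[r]
--         for c in range(len(line) - 1, -1, -1):
--             ch = line[c]
--             if p_position is None and ch == "P":
--                 p_position = (r, c)
--             if b_position is None and ch == "B":
--                 b_position = (r, c)
--             if p_position is not None and b_position is not None:
--                 return p_position, b_position
--     return p_position, b_position
-- ===== Notes on version B (the rewrite author's own statement) =====
-- stated objective: alternative
-- what changed: B scans the lines from last to first and each line from its last character to its first, recording the first hit for each of 'P' and 'B' and returning early once both are found, instead of A's full forward scan that keeps overwriting the positions.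
import Mathlib
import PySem

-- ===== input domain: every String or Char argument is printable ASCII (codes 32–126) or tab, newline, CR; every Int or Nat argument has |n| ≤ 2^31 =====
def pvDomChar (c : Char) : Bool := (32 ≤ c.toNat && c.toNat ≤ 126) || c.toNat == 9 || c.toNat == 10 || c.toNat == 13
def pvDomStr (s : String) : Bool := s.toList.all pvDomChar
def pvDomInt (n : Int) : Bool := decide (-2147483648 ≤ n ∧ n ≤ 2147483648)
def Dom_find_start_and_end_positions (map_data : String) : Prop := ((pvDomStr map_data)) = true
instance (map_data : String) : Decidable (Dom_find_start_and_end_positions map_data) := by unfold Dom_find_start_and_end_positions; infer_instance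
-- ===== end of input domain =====

-- B scans the grid backwards (last line to first, last column to first) and stops at the
-- first hit for each target, instead of A's forward scan that keeps overwriting; objective: alternative.

-- ===== PORT A =====
def find_start_and_end_positions (map_data : String) : (Option (Int × Int)) × (Option (Int × Int)) :=
  let lines := (PySem.Str.split? map_data "\n").getD []
  (PySem.List.enumerate lines 0).foldl
    (fun st rl =>
      (PySem.List.enumerate rl.2.toList 0).foldl
        (fun st cc =>
          if cc.2 == 'P' then (some (rl.1, cc.1), st.2)
          else if cc.2 == 'B' then (st.1, some (rl.1, cc.1))
          else st)
        st)
    (none, none)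

-- ===== PORT B =====
-- inner backward scan over one (already reversed) enumerated line; third component = early-exit flag
def fsaepInner (r : Int) :
    List (Int × Char) → Option (Int × Int) → Option (Int × Int) →
    (Option (Int × Int)) × (Option (Int × Int)) × Bool
  | [], p, b => (p, b, false)
  | cc :: rest, p, b =>
    let p' := if p.isNone && cc.2 == 'P' then some (r, cc.1) else p
    let b' := if b.isNone && cc.2 == 'B' then some (r, cc.1) else b
    if p'.isSome && b'.isSome then (p', b', true) else fsaepInner r rest p' b'

-- outer backward scan over the (already reversed) enumerated lines
def fsaepOuter :
    List (Int × String) → Option (Int × Int) → Option (Int × Int) →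
    (Option (Int × Int)) × (Option (Int × Int))
  | [], p, b => (p, b)
  | rl :: rest, p, b =>
    let res := fsaepInner rl.1 (PySem.List.enumerate rl.2.toList 0).reverse p b
    if res.2.2 then (res.1, res.2.1) else fsaepOuter rest res.1 res.2.1

def find_start_and_end_positions_alt (map_data : String) : (Option (Int × Int)) × (Option (Int × Int)) :=
  let lines := (PySem.Str.split? map_data "\n").getD []
  fsaepOuter (PySem.List.enumerate lines 0).reverse none none

-- ===== PRECONDITION & SPEC =====
def Spec_find_start_and_end_positions (map_data : String) (out : (Option (Int × Int)) × (Option (Int × Int))) : Prop := out = find_start_and_end_positions_alt map_data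
instance (map_data : String) (out : (Option (Int × Int)) × (Option (Int × Int))) : Decidable (Spec_find_start_and_end_positions map_data out) := by unfold Spec_find_start_and_end_positions; infer_instance

-- ===== CLAIM (what is proved, stated in full; the proofs are below) =====
def Claim_equal_find_start_and_end_positions : Prop := ∀ (map_data : String), Dom_find_start_and_end_positions map_data → Spec_find_start_and_end_positions map_data (find_start_and_end_positions map_data)

-- ===== LEMMAS AND PROOFS =====

def pvTag (r : Int) (cc : Int × Char) : (Int × Int) × Char := ((r, cc.1), cc.2)

def pvTagLine (rl : Int × String) : List ((Int × Int) × Char) :=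
  (PySem.List.enumerate rl.2.toList 0).map (pvTag rl.1)

-- first position carrying the target character
def pvPick (t : Char) : List ((Int × Int) × Char) → Option (Int × Int)
  | [] => none
  | x :: l => if x.2 == t then some x.1 else pvPick t l

def pvF (st : (Option (Int × Int)) × (Option (Int × Int))) (x : (Int × Int) × Char) :
    (Option (Int × Int)) × (Option (Int × Int)) :=
  if x.2 == 'P' then (some x.1, st.2)
  else if x.2 == 'B' then (st.1, some x.1)
  else st

def pvFlat (map_data : String) : List ((Int × Int) × Char) :=
  (PySem.List.enumerate ((PySem.Str.split? map_data "\n").getD []) 0).flatMap pvTagLine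

theorem pvPick_append (t : Char) (l1 l2 : List ((Int × Int) × Char)) :
    pvPick t (l1 ++ l2) = (pvPick t l1).or (pvPick t l2) := by
  induction l1 with
  | nil => simp [pvPick]
  | cons x l ih => simp only [List.cons_append, pvPick, ih]; split_ifs <;> simp

theorem pv_or_of_isSome {α : Type} (a b : Option α) (h : a.isSome = true) : a.or b = a := by
  cases a with
  | none => simp at h
  | some x => rfl

theorem pv_foldl_flatMap {α β σ : Type} (g : α → List β) (f : σ → β → σ) :
    ∀ (l : List α) (st : σ), (l.flatMap g).foldl f st = l.foldl (fun s x => (g x).foldl f s) st := by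
  intro l
  induction l with
  | nil => intro st; rfl
  | cons x l ih => intro st; simp [List.flatMap_cons, List.foldl_append, ih]

-- A's forward overwriting fold is "first hit in the reversed list", falling back to the incoming state
theorem pvA_fold (L : List ((Int × Int) × Char)) :
    ∀ st, L.foldl pvF st = ((pvPick 'P' L.reverse).or st.1, (pvPick 'B' L.reverse).or st.2) := by
  induction L with
  | nil => intro st; simp [pvPick]
  | cons x L ih =>
    intro st
    rw [List.foldl_cons, ih, List.reverse_cons, pvPick_append, pvPick_append, Option.or_assoc,
      Option.or_assoc]
    have hx1 : (pvPick 'P' [x]).or st.1 = (pvF st x).1 := by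
      simp only [pvPick, pvF]
      split_ifs with h h' <;> simp_all
    have hx2 : (pvPick 'B' [x]).or st.2 = (pvF st x).2 := by
      simp only [pvPick, pvF]
      split_ifs with h h' <;> simp_all
    rw [hx1, hx2]

theorem pvA_lines (lines : List String) :
    (PySem.List.enumerate lines 0).foldl
        (fun st rl =>
          (PySem.List.enumerate rl.2.toList 0).foldl
            (fun st cc =>
              if cc.2 == 'P' then (some (rl.1, cc.1), st.2)
              else if cc.2 == 'B' then (st.1, some (rl.1, cc.1))
              else st) st)
        ((none, none) : (Option (Int × Int)) × (Option (Int × Int))) =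
      (pvPick 'P' ((PySem.List.enumerate lines 0).flatMap pvTagLine).reverse,
       pvPick 'B' ((PySem.List.enumerate lines 0).flatMap pvTagLine).reverse) := by
  have hinner : ∀ (rl : Int × String) (st : (Option (Int × Int)) × (Option (Int × Int))),
      (pvTagLine rl).foldl pvF st =
        (PySem.List.enumerate rl.2.toList 0).foldl
          (fun st cc =>
            if cc.2 == 'P' then (some (rl.1, cc.1), st.2)
            else if cc.2 == 'B' then (st.1, some (rl.1, cc.1))
            else st) st := by
    intro rl st
    unfold pvTagLine
    rw [List.foldl_map]
    rfl
  rw [show (PySem.List.enumerate lines 0).foldl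
        (fun st rl =>
          (PySem.List.enumerate rl.2.toList 0).foldl
            (fun st cc =>
              if cc.2 == 'P' then (some (rl.1, cc.1), st.2)
              else if cc.2 == 'B' then (st.1, some (rl.1, cc.1))
              else st) st)
        ((none, none) : (Option (Int × Int)) × (Option (Int × Int))) =
      (PySem.List.enumerate lines 0).foldl (fun s x => (pvTagLine x).foldl pvF s) (none, none) from by
    congr 1
    funext s x
    exact (hinner x s).symm]
  rw [← pv_foldl_flatMap pvTagLine pvF, pvA_fold]
  simp

theorem pvA_eq (map_data : String) :
    find_start_and_end_positions map_data =
      (pvPick 'P' (pvFlat map_data).reverse, pvPick 'B' (pvFlat map_data).reverse) := by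
  unfold find_start_and_end_positions pvFlat
  exact pvA_lines ((PySem.Str.split? map_data "\n").getD [])

-- B's inner early-exit scan: state components, and done => both found
theorem pvInner_state (r : Int) (l : List (Int × Char)) :
    ∀ p b, (fsaepInner r l p b).1 = p.or (pvPick 'P' (l.map (pvTag r))) ∧
      (fsaepInner r l p b).2.1 = b.or (pvPick 'B' (l.map (pvTag r))) := by
  induction l with
  | nil => intro p b; simp [fsaepInner, pvPick]
  | cons cc rest ih =>
    intro p b
    simp only [fsaepInner, List.map_cons]
    set p1 := (if p.isNone && cc.2 == 'P' then some (r, cc.1) else p) with hp1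
    set b1 := (if b.isNone && cc.2 == 'B' then some (r, cc.1) else b) with hb1
    have hp : p1.or (pvPick 'P' (rest.map (pvTag r))) = p.or (pvPick 'P' (pvTag r cc :: rest.map (pvTag r))) := by
      rw [hp1]
      cases p with
      | none => simp only [pvPick, pvTag, Option.isNone_none, Bool.true_and, Option.none_or]
                split_ifs <;> simp
      | some v => simp
    have hb : b1.or (pvPick 'B' (rest.map (pvTag r))) = b.or (pvPick 'B' (pvTag r cc :: rest.map (pvTag r))) := by
      rw [hb1]
      cases b with
      | none => simp only [pvPick, pvTag, Option.isNone_none, Bool.true_and, Option.none_or]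
                split_ifs <;> simp
      | some v => simp
    by_cases hdone : (p1.isSome && b1.isSome) = true
    · rw [if_pos hdone]
      rw [Bool.and_eq_true] at hdone
      exact ⟨by rw [← hp, pv_or_of_isSome _ _ hdone.1],
             by rw [← hb, pv_or_of_isSome _ _ hdone.2]⟩
    · rw [if_neg hdone]
      obtain ⟨ih1, ih2⟩ := ih p1 b1
      exact ⟨by rw [ih1, hp], by rw [ih2, hb]⟩

theorem pvInner_done (r : Int) (l : List (Int × Char)) :
    ∀ p b, (fsaepInner r l p b).2.2 = true →
      (fsaepInner r l p b).1.isSome = true ∧ (fsaepInner r l p b).2.1.isSome = true := by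
  induction l with
  | nil => intro p b h; simp [fsaepInner] at h
  | cons cc rest ih =>
    intro p b
    simp only [fsaepInner]
    set p1 := (if p.isNone && cc.2 == 'P' then some (r, cc.1) else p) with hp1
    set b1 := (if b.isNone && cc.2 == 'B' then some (r, cc.1) else b) with hb1
    by_cases hdone : (p1.isSome && b1.isSome) = true
    · rw [if_pos hdone]
      rw [Bool.and_eq_true] at hdone
      exact fun _ => hdone
    · rw [if_neg hdone]
      exact ih p1 b1

theorem pvOuter_eq (L : List (Int × String)) :
    ∀ p b, fsaepOuter L p b =
      (p.or (pvPick 'P' (L.flatMap (fun rl => (pvTagLine rl).reverse))),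
       b.or (pvPick 'B' (L.flatMap (fun rl => (pvTagLine rl).reverse)))) := by
  induction L with
  | nil => intro p b; simp [fsaepOuter, pvPick]
  | cons rl rest ih =>
    intro p b
    simp only [fsaepOuter]
    have htag : (PySem.List.enumerate rl.2.toList 0).reverse.map (pvTag rl.1)
        = (pvTagLine rl).reverse := by
      simp [pvTagLine]
    obtain ⟨h1, h2⟩ := pvInner_state rl.1 (PySem.List.enumerate rl.2.toList 0).reverse p b
    rw [htag] at h1 h2
    simp only [List.flatMap_cons, pvPick_append]
    by_cases hdone : (fsaepInner rl.1 (PySem.List.enumerate rl.2.toList 0).reverse p b).2.2 = true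
    · rw [if_pos hdone]
      obtain ⟨hs1, hs2⟩ := pvInner_done rl.1 (PySem.List.enumerate rl.2.toList 0).reverse p b hdone
      rw [← Option.or_assoc, ← Option.or_assoc, ← h1, ← h2,
        pv_or_of_isSome _ _ hs1, pv_or_of_isSome _ _ hs2]
    · rw [if_neg hdone, ih, h1, h2, Option.or_assoc, Option.or_assoc]

theorem pvB_eq (map_data : String) :
    find_start_and_end_positions_alt map_data =
      (pvPick 'P' (pvFlat map_data).reverse, pvPick 'B' (pvFlat map_data).reverse) := by
  have h : ∀ lines : List String,
      fsaepOuter (PySem.List.enumerate lines 0).reverse none none =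
        (pvPick 'P' ((PySem.List.enumerate lines 0).flatMap pvTagLine).reverse,
         pvPick 'B' ((PySem.List.enumerate lines 0).flatMap pvTagLine).reverse) := by
    intro lines
    rw [pvOuter_eq]
    rw [List.reverse_flatMap]
    simp [Function.comp_def]
  unfold find_start_and_end_positions_alt pvFlat
  exact h ((PySem.Str.split? map_data "\n").getD [])

-- ===== VERDICT (by name: the statement is the Claim_ definition above) =====
theorem find_start_and_end_positions_spec : Claim_equal_find_start_and_end_positions := by
  intro map_data _
  unfold Spec_find_start_and_end_positions
  rw [pvA_eq, pvB_eq]
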